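-- pv_equiv track=rewrite | github.com/mwbadran/Sa3id | bagrutjson.py | detect_subject_by_id
-- ===== SOURCE A (Python) =====
-- PREFIX_SUBJECT_MAP = {
--     '899': "מדעי המחשב",
--     '816': 'אמנות שימושית',
--     '880': "תיירות",
--     '845': "מערכות חשמל",
--     '838': "מכניקה הנדסית",
--     '815': "אלקטרוניקה ומחשבים",
--     '585': "רוסית",
--     '574': "גרמנית",
--     '66': "מדעי המדינה",
--     "65": "סוציולוגיה",
--     "49": "שיטות מחקר", # EXAM SHARED ACCROSS SUBJECTS: "סוציולוגיה", "תקשורת"..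
--     "63": "כלכלה",
--     '64': "מדעי הסביבה",
--     '57': "גאוגרפיה",
--     '47': "דת האסלאם",
--     '73': "דת נוצרית",
--     '27': "מורשת הדרוזים",
--     '48': "מוזיקה",
--     '46': "חקלאות",
--     '43': "ביולוגיה",
--     '41': "חינוך גופן",
--     '37': "כימיה",
--     '36': 'פיזיקה',
--     '35': 'מתמטיקה',
--     '34': "אזרחות",
--     '30': "היסטוריה ליהודים",
--     '29': "היסטוריה ליהודים",
--     '25': "היסטוריה לדרוזים",
--     '23': "היסטוריה לערבים",
--     '22': "היסטוריה ליהודים",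
--     '21': "ערבית לדרוזים",
--     '20': "ערבית לערבים",
--     '16': "אנגלית",
--     '15': "עברית לדרוזים",
--     '14': "עברית לערבים",
--     '11': "עברית ליהודים",
-- }
--
-- def detect_subject_by_id(quiz_id):
--     # רק מספרים > 9999
--     if not quiz_id.isdigit() or int(quiz_id) <= 9999:
--         return 'אחר'
--     # גאוגרפיה: רק 5 ספרות שמתחילות ב-57
--     if quiz_id.startswith('57') and len(quiz_id) == 5:
--         return PREFIX_SUBJECT_MAP['57']
--     # שאר המקפים
--     for prefix in sorted(PREFIX_SUBJECT_MAP, key=len, reverse=True):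
--         if prefix == '57':
--             continue
--         if quiz_id.startswith(prefix):
--             return PREFIX_SUBJECT_MAP[prefix]
--     return 'אחר'
-- ===== SOURCE B (Python) =====
-- # B: no per-call sorted() and no scan over the key table; the id's own 3-char and
-- # 2-char prefixes are dispatched through two fixed per-width case tables, and the
-- # '57' family (geography / German) is resolved by direct branching.
--
-- def _subject3(p):
--     match p:
--         case '899': return "מדעי המחשב"
--         case '816': return 'אמנות שימושית'
--         case '880': return "תיירות"
--         case '845': return "מערכות חשמל"
--         case '838': return "מכניקה הנדסית"
--         case '815': return "אלקטרוניקה ומחשבים"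
--         case '585': return "רוסית"
--         case '574': return "גרמנית"
--         case _: return None
--
-- def _subject2(p):
--     match p:
--         case '66': return "מדעי המדינה"
--         case '65': return "סוציולוגיה"
--         case '49': return "שיטות מחקר"
--         case '63': return "כלכלה"
--         case '64': return "מדעי הסביבה"
--         case '47': return "דת האסלאם"
--         case '73': return "דת נוצרית"
--         case '27': return "מורשת הדרוזים"
--         case '48': return "מוזיקה"
--         case '46': return "חקלאות"
--         case '43': return "ביולוגיה"
--         case '41': return "חינוך גופן"
--         case '37': return "כימיה"
--         case '36': return 'פיזיקה'
--         case '35': return 'מתמטיקה'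
--         case '34': return "אזרחות"
--         case '30': return "היסטוריה ליהודים"
--         case '29': return "היסטוריה ליהודים"
--         case '25': return "היסטוריה לדרוזים"
--         case '23': return "היסטוריה לערבים"
--         case '22': return "היסטוריה ליהודים"
--         case '21': return "ערבית לדרוזים"
--         case '20': return "ערבית לערבים"
--         case '16': return "אנגלית"
--         case '15': return "עברית לדרוזים"
--         case '14': return "עברית לערבים"
--         case '11': return "עברית ליהודים"
--         case _: return None
--
-- def detect_subject_by_id(quiz_id):
--     if not quiz_id.isdigit() or int(quiz_id) <= 9999:
--         return 'אחר'
--     if quiz_id.startswith('57'):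
--         if len(quiz_id) == 5:
--             return "גאוגרפיה"
--         return "גרמנית" if quiz_id.startswith('574') else 'אחר'
--     return _subject3(quiz_id[:3]) or _subject2(quiz_id[:2]) or 'אחר'
-- ===== Notes on version B (the rewrite author's own statement) =====
-- stated objective: alternative
-- what changed: B removes A's per-call sorted() and the linear startswith-scan over the 35-key table: it dispatches the id's own 3-char and 2-char prefixes through two fixed per-width case tables and resolves the '57' family (geography/German) by direct branching, so the key table is never traversed.
import Mathlib
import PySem

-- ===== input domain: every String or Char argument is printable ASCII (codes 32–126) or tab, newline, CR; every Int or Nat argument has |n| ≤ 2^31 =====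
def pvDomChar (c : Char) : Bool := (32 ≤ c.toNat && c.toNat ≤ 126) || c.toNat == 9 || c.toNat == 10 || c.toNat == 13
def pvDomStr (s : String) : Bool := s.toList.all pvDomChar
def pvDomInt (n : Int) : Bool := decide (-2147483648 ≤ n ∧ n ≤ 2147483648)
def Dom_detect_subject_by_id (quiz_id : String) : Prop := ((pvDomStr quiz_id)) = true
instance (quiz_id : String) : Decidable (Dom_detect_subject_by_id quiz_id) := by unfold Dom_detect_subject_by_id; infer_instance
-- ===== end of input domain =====

-- B replaces A's per-call sorted() + startswith-scan over the key table by direct dispatch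
-- of the id's own 3-char and 2-char prefixes through fixed per-width case tables
-- (objective: alternative; no table traversal at all).

-- ===== PORT A =====
-- the module-level dict of A (insertion order as in the Python source)
def PREFIX_SUBJECT_MAP : PySem.Dict String String := PySem.Dict.ofList [
  ("899", "מדעי המחשב"), ("816", "אמנות שימושית"), ("880", "תיירות"), ("845", "מערכות חשמל"),
  ("838", "מכניקה הנדסית"), ("815", "אלקטרוניקה ומחשבים"), ("585", "רוסית"), ("574", "גרמנית"),
  ("66", "מדעי המדינה"), ("65", "סוציולוגיה"), ("49", "שיטות מחקר"), ("63", "כלכלה"),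
  ("64", "מדעי הסביבה"), ("57", "גאוגרפיה"), ("47", "דת האסלאם"), ("73", "דת נוצרית"),
  ("27", "מורשת הדרוזים"), ("48", "מוזיקה"), ("46", "חקלאות"), ("43", "ביולוגיה"),
  ("41", "חינוך גופן"), ("37", "כימיה"), ("36", "פיזיקה"), ("35", "מתמטיקה"),
  ("34", "אזרחות"), ("30", "היסטוריה ליהודים"), ("29", "היסטוריה ליהודים"), ("25", "היסטוריה לדרוזים"),
  ("23", "היסטוריה לערבים"), ("22", "היסטוריה ליהודים"), ("21", "ערבית לדרוזים"), ("20", "ערבית לערבים"),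
  ("16", "אנגלית"), ("15", "עברית לדרוזים"), ("14", "עברית לערבים"), ("11", "עברית ליהודים")]

-- the 'for prefix in sorted(...)' loop with its early return; PREFIX_SUBJECT_MAP[prefix] is
-- ported as get? + getD "" (the key is drawn from the dict's own keys, so KeyError is unreachable)
def detectLoopA (quiz_id : String) : List String → String
  | [] => "אחר"
  | p :: rest =>
    if p = "57" then detectLoopA quiz_id rest
    else if PySem.Str.startswith quiz_id p then (PREFIX_SUBJECT_MAP.get? p).getD ""
    else detectLoopA quiz_id rest

def detect_subject_by_id (quiz_id : String) : String :=
  if PySem.Str.strIsdigit quiz_id = false ∨ (PySem.Int.ofStr? quiz_id).getD 0 ≤ 9999 then "אחר"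
  else if PySem.Str.startswith quiz_id "57" = true ∧ PySem.Str.len quiz_id = 5 then
    (PREFIX_SUBJECT_MAP.get? "57").getD ""
  else
    detectLoopA quiz_id
      (PySem.List.sorted PREFIX_SUBJECT_MAP.keys (key := fun p => PySem.Str.len p) (reverse := true))

-- ===== PORT B =====
-- Source B's _subject3 / _subject2: per-width case tables (match/case), none = Python's None
def subject3 : String → Option String
  | "899" => some "מדעי המחשב"
  | "816" => some "אמנות שימושית"
  | "880" => some "תיירות"
  | "845" => some "מערכות חשמל"
  | "838" => some "מכניקה הנדסית"
  | "815" => some "אלקטרוניקה ומחשבים"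
  | "585" => some "רוסית"
  | "574" => some "גרמנית"
  | _ => none

def subject2 : String → Option String
  | "66" => some "מדעי המדינה"
  | "65" => some "סוציולוגיה"
  | "49" => some "שיטות מחקר"
  | "63" => some "כלכלה"
  | "64" => some "מדעי הסביבה"
  | "47" => some "דת האסלאם"
  | "73" => some "דת נוצרית"
  | "27" => some "מורשת הדרוזים"
  | "48" => some "מוזיקה"
  | "46" => some "חקלאות"
  | "43" => some "ביולוגיה"
  | "41" => some "חינוך גופן"
  | "37" => some "כימיה"
  | "36" => some "פיזיקה"
  | "35" => some "מתמטיקה"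
  | "34" => some "אזרחות"
  | "30" => some "היסטוריה ליהודים"
  | "29" => some "היסטוריה ליהודים"
  | "25" => some "היסטוריה לדרוזים"
  | "23" => some "היסטוריה לערבים"
  | "22" => some "היסטוריה ליהודים"
  | "21" => some "ערבית לדרוזים"
  | "20" => some "ערבית לערבים"
  | "16" => some "אנגלית"
  | "15" => some "עברית לדרוזים"
  | "14" => some "עברית לערבים"
  | "11" => some "עברית ליהודים"
  | _ => none

-- 'x or y or z' over Optional[str]/non-empty strings is ported as the getD chain (exact:
-- every table value is a non-empty, hence truthy, string)
def detect_subject_by_id_alt (quiz_id : String) : String :=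
  if PySem.Str.strIsdigit quiz_id = false ∨ (PySem.Int.ofStr? quiz_id).getD 0 ≤ 9999 then "אחר"
  else if PySem.Str.startswith quiz_id "57" then
    if PySem.Str.len quiz_id = 5 then "גאוגרפיה"
    else if PySem.Str.startswith quiz_id "574" then "גרמנית" else "אחר"
  else
    (subject3 (PySem.Str.slice quiz_id none (some 3))).getD
      ((subject2 (PySem.Str.slice quiz_id none (some 2))).getD "אחר")

-- ===== PRECONDITION & SPEC =====
def Spec_detect_subject_by_id (quiz_id : String) (out : String) : Prop := out = detect_subject_by_id_alt quiz_id
instance (quiz_id : String) (out : String) : Decidable (Spec_detect_subject_by_id quiz_id out) := by unfold Spec_detect_subject_by_id; infer_instance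

-- ===== CLAIM (what is proved, stated in full; the proofs are below) =====
def Claim_equal_detect_subject_by_id : Prop := ∀ (quiz_id : String), Dom_detect_subject_by_id quiz_id → Spec_detect_subject_by_id quiz_id (detect_subject_by_id quiz_id)

-- ===== LEMMAS AND PROOFS =====

-- A's table split into its 3-char-key part and its 2-char-key part (proof bookkeeping)
def items3 : List (String × String) := [
  ("899", "מדעי המחשב"), ("816", "אמנות שימושית"), ("880", "תיירות"), ("845", "מערכות חשמל"),
  ("838", "מכניקה הנדסית"), ("815", "אלקטרוניקה ומחשבים"), ("585", "רוסית"), ("574", "גרמנית")]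

def items2 : List (String × String) := [
  ("66", "מדעי המדינה"), ("65", "סוציולוגיה"), ("49", "שיטות מחקר"), ("63", "כלכלה"),
  ("64", "מדעי הסביבה"), ("57", "גאוגרפיה"), ("47", "דת האסלאם"), ("73", "דת נוצרית"),
  ("27", "מורשת הדרוזים"), ("48", "מוזיקה"), ("46", "חקלאות"), ("43", "ביולוגיה"),
  ("41", "חינוך גופן"), ("37", "כימיה"), ("36", "פיזיקה"), ("35", "מתמטיקה"),
  ("34", "אזרחות"), ("30", "היסטוריה ליהודים"), ("29", "היסטוריה ליהודים"), ("25", "היסטוריה לדרוזים"),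
  ("23", "היסטוריה לערבים"), ("22", "היסטוריה ליהודים"), ("21", "ערבית לדרוזים"), ("20", "ערבית לערבים"),
  ("16", "אנגלית"), ("15", "עברית לדרוזים"), ("14", "עברית לערבים"), ("11", "עברית ליהודים")]

set_option maxRecDepth 10000 in
theorem sortedKeys_eq :
    PySem.List.sorted PREFIX_SUBJECT_MAP.keys (key := fun p => PySem.Str.len p) (reverse := true) =
      items3.map Prod.fst ++ items2.map Prod.fst := by rfl

set_option maxRecDepth 10000 in
theorem hlen3 : ∀ p ∈ items3, p.1.toList.length = 3 := by decide

set_option maxRecDepth 10000 in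
theorem hlen2 : ∀ p ∈ items2, p.1.toList.length = 2 := by decide

set_option maxRecDepth 10000 in
theorem hval3 : ∀ p ∈ items3, (PREFIX_SUBJECT_MAP.get? p.1).getD "" = p.2 := by decide

set_option maxRecDepth 10000 in
theorem hval2 : ∀ p ∈ items2, (PREFIX_SUBJECT_MAP.get? p.1).getD "" = p.2 := by decide

set_option maxRecDepth 10000 in
theorem keys2_ne57 : ∀ p ∈ items2, p.1 = "57" ∨ p.1.toList ≠ ['5', '7'] := by decide

set_option maxRecDepth 10000 in
theorem keys3_57 : ∀ p ∈ items3, p.1 = "574" ∨ p.1.toList.take 2 ≠ ['5', '7'] := by decide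

set_option maxRecDepth 10000 in
theorem geo_val : (PREFIX_SUBJECT_MAP.get? "57").getD "" = "גאוגרפיה" := by rfl

-- Source B's case tables agree with first-match lookup in the corresponding table halves
set_option maxRecDepth 10000 in
theorem subject3_eq (x : String) : subject3 x = (PySem.Dict.mk items3).get? x := by
  unfold subject3
  split <;> first | rfl | (
                           rename_i h1 h2 h3 h4 h5 h6 h7 h8
                           have e1 : ("899" == x) = false := beq_eq_false_iff_ne.mpr (fun h => h1 h.symm)
                           have e2 : ("816" == x) = false := beq_eq_false_iff_ne.mpr (fun h => h2 h.symm)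
                           have e3 : ("880" == x) = false := beq_eq_false_iff_ne.mpr (fun h => h3 h.symm)
                           have e4 : ("845" == x) = false := beq_eq_false_iff_ne.mpr (fun h => h4 h.symm)
                           have e5 : ("838" == x) = false := beq_eq_false_iff_ne.mpr (fun h => h5 h.symm)
                           have e6 : ("815" == x) = false := beq_eq_false_iff_ne.mpr (fun h => h6 h.symm)
                           have e7 : ("585" == x) = false := beq_eq_false_iff_ne.mpr (fun h => h7 h.symm)
                           have e8 : ("574" == x) = false := beq_eq_false_iff_ne.mpr (fun h => h8 h.symm)
                           simp only [items3, PySem.Dict.get?, List.find?, e1, e2, e3, e4, e5, e6, e7, e8, Option.map_none])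

set_option maxRecDepth 10000 in
theorem subject2_eq (x : String) (hx : x ≠ "57") : subject2 x = (PySem.Dict.mk items2).get? x := by
  unfold subject2
  split <;> first | rfl | (
                           rename_i h1 h2 h3 h4 h5 h6 h7 h8 h9 h10 h11 h12 h13 h14 h15 h16 h17 h18 h19 h20 h21 h22 h23 h24 h25 h26 h27
                           have e1 : ("66" == x) = false := beq_eq_false_iff_ne.mpr (fun h => h1 h.symm)
                           have e2 : ("65" == x) = false := beq_eq_false_iff_ne.mpr (fun h => h2 h.symm)
                           have e3 : ("49" == x) = false := beq_eq_false_iff_ne.mpr (fun h => h3 h.symm)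
                           have e4 : ("63" == x) = false := beq_eq_false_iff_ne.mpr (fun h => h4 h.symm)
                           have e5 : ("64" == x) = false := beq_eq_false_iff_ne.mpr (fun h => h5 h.symm)
                           have e6 : ("47" == x) = false := beq_eq_false_iff_ne.mpr (fun h => h6 h.symm)
                           have e0 : ("57" == x) = false := beq_eq_false_iff_ne.mpr (fun h => hx h.symm)
                           have e7 : ("73" == x) = false := beq_eq_false_iff_ne.mpr (fun h => h7 h.symm)
                           have e8 : ("27" == x) = false := beq_eq_false_iff_ne.mpr (fun h => h8 h.symm)
                           have e9 : ("48" == x) = false := beq_eq_false_iff_ne.mpr (fun h => h9 h.symm)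
                           have e10 : ("46" == x) = false := beq_eq_false_iff_ne.mpr (fun h => h10 h.symm)
                           have e11 : ("43" == x) = false := beq_eq_false_iff_ne.mpr (fun h => h11 h.symm)
                           have e12 : ("41" == x) = false := beq_eq_false_iff_ne.mpr (fun h => h12 h.symm)
                           have e13 : ("37" == x) = false := beq_eq_false_iff_ne.mpr (fun h => h13 h.symm)
                           have e14 : ("36" == x) = false := beq_eq_false_iff_ne.mpr (fun h => h14 h.symm)
                           have e15 : ("35" == x) = false := beq_eq_false_iff_ne.mpr (fun h => h15 h.symm)
                           have e16 : ("34" == x) = false := beq_eq_false_iff_ne.mpr (fun h => h16 h.symm)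
                           have e17 : ("30" == x) = false := beq_eq_false_iff_ne.mpr (fun h => h17 h.symm)
                           have e18 : ("29" == x) = false := beq_eq_false_iff_ne.mpr (fun h => h18 h.symm)
                           have e19 : ("25" == x) = false := beq_eq_false_iff_ne.mpr (fun h => h19 h.symm)
                           have e20 : ("23" == x) = false := beq_eq_false_iff_ne.mpr (fun h => h20 h.symm)
                           have e21 : ("22" == x) = false := beq_eq_false_iff_ne.mpr (fun h => h21 h.symm)
                           have e22 : ("21" == x) = false := beq_eq_false_iff_ne.mpr (fun h => h22 h.symm)
                           have e23 : ("20" == x) = false := beq_eq_false_iff_ne.mpr (fun h => h23 h.symm)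
                           have e24 : ("16" == x) = false := beq_eq_false_iff_ne.mpr (fun h => h24 h.symm)
                           have e25 : ("15" == x) = false := beq_eq_false_iff_ne.mpr (fun h => h25 h.symm)
                           have e26 : ("14" == x) = false := beq_eq_false_iff_ne.mpr (fun h => h26 h.symm)
                           have e27 : ("11" == x) = false := beq_eq_false_iff_ne.mpr (fun h => h27 h.symm)
                           simp only [items2, PySem.Dict.get?, List.find?, e0, e1, e2, e3, e4, e5, e6, e7, e8, e9, e10, e11, e12, e13, e14, e15, e16, e17, e18, e19, e20, e21, e22, e23, e24, e25, e26, e27, Option.map_none])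

theorem slice3_eq (s : String) : PySem.Str.slice s none (some 3) = String.ofList (s.toList.take 3) := by
  simp [PySem.Str.slice, pysem]

theorem slice2_eq (s : String) : PySem.Str.slice s none (some 2) = String.ofList (s.toList.take 2) := by
  simp [PySem.Str.slice, pysem]

-- a fixed-width prefix test is equality with the input's own slice of that width
theorem cond_eq (k : String) (cs : List Char) (n : Nat) (hk : k.toList.length = n) :
    k.toList.isPrefixOf cs = true ↔ k = String.ofList (cs.take n) := by
  rw [List.isPrefixOf_iff_prefix, List.prefix_iff_eq_take, hk, ← String.toList_inj,
    String.toList_ofList]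

theorem take_eq_of_short {cs l : List Char} {n : Nat} (h : cs.take n = l) (hl : l.length < n) :
    cs = l := by
  have hlen : (cs.take n).length = min n cs.length := List.length_take ..
  rw [h] at hlen
  have : cs.length ≤ n := by omega
  rw [← h, List.take_of_length_le (by omega)]

theorem get?_mk_none {items : List (String × String)} {x : String}
    (h : ∀ p ∈ items, p.1 ≠ x) : (PySem.Dict.mk items).get? x = none := by
  induction items with
  | nil => rfl
  | cons p tl ih =>
    rw [PySem.Dict.get?_mk_cons]
    have hp := h p (by simp)
    simp only [beq_iff_eq, if_neg hp]
    exact ih fun q hq => h q (by simp [hq])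

-- one phase of A's loop over same-width keys equals one first-match lookup of the matching slice
theorem loopA_phase (s x : String) (n : Nat) (items : List (String × String)) (rest : List String)
    (hlen : ∀ p ∈ items, p.1.toList.length = n)
    (hval : ∀ p ∈ items, (PREFIX_SUBJECT_MAP.get? p.1).getD "" = p.2)
    (hx57 : x ≠ "57")
    (hx : x = String.ofList (s.toList.take n)) :
    detectLoopA s (items.map Prod.fst ++ rest) =
      match (PySem.Dict.mk items).get? x with
      | some v => v
      | none => detectLoopA s rest := by
  induction items with
  | nil => rfl
  | cons p tl ih =>
    rw [List.map_cons, List.cons_append, PySem.Dict.get?_mk_cons]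
    by_cases h57 : p.1 = "57"
    · have hne : ¬ (p.1 == x) = true := by simp [h57]; exact fun hh => hx57 hh.symm
      simp only [detectLoopA, if_pos h57, Bool.not_eq_true] at *
      rw [if_neg (by simpa using hne)]
      exact ih (fun q hq => hlen q (by simp [hq])) (fun q hq => hval q (by simp [hq]))
    · have hcond : PySem.Str.startswith s p.1 = true ↔ p.1 = x := by
        rw [PySem.Str.startswith, PySem.Chars.startswith,
          cond_eq p.1 s.toList n (hlen p (by simp)), hx]
      by_cases hm : p.1 = x
      · simp only [detectLoopA, if_neg h57, if_pos (hcond.mpr hm), beq_iff_eq, if_pos hm]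
        exact hval p (by simp)
      · have : ¬ PySem.Str.startswith s p.1 = true := fun hh => hm (hcond.mp hh)
        simp only [detectLoopA, if_neg h57, if_neg this, beq_iff_eq, if_neg hm]
        exact ih (fun q hq => hlen q (by simp [hq])) (fun q hq => hval q (by simp [hq]))

theorem loopA_miss (s : String) (keys : List String)
    (h : ∀ k ∈ keys, k = "57" ∨ PySem.Str.startswith s k = false) :
    detectLoopA s keys = "אחר" := by
  induction keys with
  | nil => rfl
  | cons k tl ih =>
    have ih' := ih fun q hq => h q (by simp [hq])
    rcases h k (by simp) with hk | hk
    · simp [detectLoopA, hk, ih']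
    · by_cases h57 : k = "57"
      · simp [detectLoopA, h57, ih']
      · have hk' : PySem.Chars.startswith s.toList k.toList = false := hk
        simp only [detectLoopA, if_neg h57]
        rw [if_neg (by simp [hk'])]
        exact ih'

-- ===== VERDICT (by name: the statement is the Claim_ definition above) =====
theorem detect_subject_by_id_spec : Claim_equal_detect_subject_by_id := by
  intro s _
  unfold Spec_detect_subject_by_id
  by_cases h57 : s = "57"
  · subst h57; decide
  · have h57L : s.toList ≠ ['5', '7'] := by
      intro h; exact h57 (by rw [← String.toList_inj, h]; rfl)
    unfold detect_subject_by_id detect_subject_by_id_alt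
    by_cases hg : (PySem.Str.strIsdigit s = false ∨ (PySem.Int.ofStr? s).getD 0 ≤ 9999)
    · simp only [if_pos hg]
    · simp only [if_neg hg]
      by_cases hsw : PySem.Str.startswith s "57" = true
      · -- the '57' family
        have htake2 : s.toList.take 2 = ['5', '7'] := by
          have h' := congrArg String.toList ((cond_eq "57" s.toList 2 rfl).mp hsw)
          simpa using h'.symm
        have hlen3' : 3 ≤ s.toList.length := by
          have h2 := congrArg List.length htake2
          simp only [List.length_take] at h2
          by_contra hlt
          push Not at hlt
          have hs2 : s.toList = ['5', '7'] := by
            rw [← htake2, List.take_of_length_le (by omega)]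
          exact h57L hs2
        by_cases hl5 : PySem.Str.len s = 5
        · simp only [if_pos (And.intro hsw hl5), if_pos hsw, if_pos hl5, geo_val]
        · rw [if_neg (fun hc => hl5 hc.2), if_pos hsw, if_neg hl5, sortedKeys_eq]
          set x3 := String.ofList (s.toList.take 3) with hx3
          have hx3c : x3.toList = s.toList.take 3 := by rw [hx3, String.toList_ofList]
          have hx3len : x3.toList.length = 3 := by rw [hx3c, List.length_take]; omega
          have hx3_57 : x3 ≠ "57" := by
            intro h; rw [h] at hx3len; simp at hx3len
          have hx3t2 : x3.toList.take 2 = ['5', '7'] := by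
            rw [hx3c, List.take_take]; simpa using htake2
          rw [loopA_phase s x3 3 items3 (items2.map Prod.fst) hlen3 hval3 hx3_57 hx3]
          have hmiss2 : detectLoopA s (items2.map Prod.fst) = "אחר" := by
            apply loopA_miss
            intro k hk
            obtain ⟨p, hp, hpk⟩ := List.mem_map.mp hk
            rcases keys2_ne57 p hp with hpe | hpe
            · left; rw [← hpk, hpe]
            · right
              rw [← hpk, PySem.Str.startswith, PySem.Chars.startswith, Bool.eq_false_iff]
              intro hh
              rw [cond_eq p.1 s.toList 2 (hlen2 p hp), ← String.toList_inj,
                String.toList_ofList, htake2] at hh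
              exact hpe hh
          by_cases h574 : PySem.Str.startswith s "574" = true
          · have hx574 : x3 = "574" := by
              have := (cond_eq "574" s.toList 3 rfl).mp h574
              rw [hx3]; exact this.symm
            rw [if_pos h574, hx574]; rfl
          · have hx574 : x3 ≠ "574" := by
              intro h
              apply h574
              rw [PySem.Str.startswith, PySem.Chars.startswith,
                cond_eq "574" s.toList 3 rfl]
              exact h.symm ▸ (by rw [hx3])
            have hnone : (PySem.Dict.mk items3).get? x3 = none := by
              apply get?_mk_none
              intro p hp hpx
              rcases keys3_57 p hp with hpe | hpe
              · exact hx574 (hpe ▸ hpx ▸ rfl)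
              · apply hpe; rw [hpx, hx3t2]
            rw [hnone, if_neg h574]
            exact hmiss2
      · -- no '57' prefix: two case dispatches against the two loop phases
        rw [if_neg (fun hc => hsw hc.1), if_neg hsw, sortedKeys_eq, slice3_eq, slice2_eq]
        set x3 := String.ofList (s.toList.take 3) with hx3
        set x2 := String.ofList (s.toList.take 2) with hx2
        have hnp : ¬ s.toList.take 2 = ['5', '7'] := by
          intro h
          apply hsw
          rw [PySem.Str.startswith, PySem.Chars.startswith, cond_eq "57" s.toList 2 rfl,
            ← String.toList_inj, String.toList_ofList, h]
          rfl
        have hx2_57 : x2 ≠ "57" := by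
          intro h
          apply hnp
          rw [hx2, ← String.toList_inj, String.toList_ofList] at h
          exact h
        have hx3_57 : x3 ≠ "57" := by
          intro h
          rw [hx3, ← String.toList_inj, String.toList_ofList] at h
          exact h57L (take_eq_of_short h (by decide))
        rw [subject3_eq x3, subject2_eq x2 hx2_57,
          loopA_phase s x3 3 items3 (items2.map Prod.fst) hlen3 hval3 hx3_57 hx3]
        cases hC3 : (PySem.Dict.mk items3).get? x3 with
        | some v => simp
        | none =>
          simp only [Option.getD_none]
          have hA2 : detectLoopA s (items2.map Prod.fst) =
              match (PySem.Dict.mk items2).get? x2 with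
              | some v => v
              | none => "אחר" := by
            have := loopA_phase s x2 2 items2 [] hlen2 hval2 hx2_57 hx2
            rwa [List.append_nil] at this
          rw [hA2]
          cases hC2 : (PySem.Dict.mk items2).get? x2 <;> simp
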